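-- pv_equiv track=rewrite | github.com/huntzhan/zhlint | zhlint/lcs.py | lcs_marks
-- ===== SOURCE A (Python) =====
-- def lcs_marks(x, y):
--     # reverse inputs.
--     x = tuple(reversed(x))
--     y = tuple(reversed(y))
--
--     nx = len(x)
--     ny = len(y)
--
--     # one-based.
--     # nx * ny matrix.
--     dp = [[None] * (ny + 1) for _ in range(nx + 1)]
--
--     TO_TOP = 1
--     TO_TOP_LEFT = 2
--
--     for xi in range(nx + 1):
--         for yi in range(min(xi + 1, ny + 1)):
--             if xi == 0 or yi == 0:
--                 dp[xi][yi] = None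
--                 continue
--             if x[xi - 1] == y[yi - 1]:
--                 dp[xi][yi] = TO_TOP_LEFT
--             else:
--                 dp[xi][yi] = TO_TOP
--
--     marks = [False] * nx
--     xi = nx
--     yi = ny
--     while yi > 0 and xi > 0:
--         while dp[xi][yi] == TO_TOP:
--             xi -= 1
--         if dp[xi][yi] is None:
--             raise RuntimeError
--         # find TO_TOP_LEFT.
--         marks[xi - 1] = True
--         xi -= 1
--         yi -= 1
--
--     # reverse back.
--     marks = tuple(reversed(marks))
--     return marks
-- ===== SOURCE B (Python) =====
-- def lcs_marks(x, y):
--     # One forward pass, two pointers: mark the greedy leftmost match of y in x.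
--     # No dp matrix, no reversals: O(len(x)) time, O(len(x)) space.
--     marks = []
--     j = 0
--     for v in x:
--         if j < len(y) and v == y[j]:
--             marks.append(True)
--             j += 1
--         else:
--             marks.append(False)
--     if j < len(y):
--         raise RuntimeError
--     return tuple(marks)
-- ===== Notes on version B (the rewrite author's own statement) =====
-- stated objective: faster
-- what changed: Replaced the (nx+1)x(ny+1) direction matrix plus reversed-index backtrack with a single forward two-pointer pass that marks the greedy leftmost match directly.
-- outside the precondition, e.g. on lcs_marks([], [1]): A returns [], B raises RuntimeError
import Mathlib
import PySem

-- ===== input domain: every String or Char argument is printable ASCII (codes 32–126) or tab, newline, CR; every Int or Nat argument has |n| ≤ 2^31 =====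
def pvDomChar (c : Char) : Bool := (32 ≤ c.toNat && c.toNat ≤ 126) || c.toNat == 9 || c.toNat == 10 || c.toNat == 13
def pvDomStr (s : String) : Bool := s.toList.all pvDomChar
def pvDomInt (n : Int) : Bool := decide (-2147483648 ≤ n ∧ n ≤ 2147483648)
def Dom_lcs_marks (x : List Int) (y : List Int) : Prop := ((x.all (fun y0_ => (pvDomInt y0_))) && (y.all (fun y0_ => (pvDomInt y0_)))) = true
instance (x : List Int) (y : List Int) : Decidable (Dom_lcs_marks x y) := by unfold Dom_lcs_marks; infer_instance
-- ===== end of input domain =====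

-- B replaces A's (nx+1)x(ny+1) direction matrix and reversed-index backtrack by one
-- forward two-pointer pass marking the greedy leftmost match (objective: faster).

-- ===== PORT A =====
-- dp[xi][yi] access (in-range Python indexing on the built matrix)
def dpAt (dp : List (List (Option Int))) (xi yi : Nat) : Option Int :=
  (dp.getD xi []).getD yi none

-- inner loop 'for yi in range(min(xi+1, ny+1)): dp[xi][yi] = …' on row xi
def buildRow (xr yr : List Int) (ny : Nat) (xi : Nat) : List (Option Int) :=
  (List.range (min (xi + 1) (ny + 1))).foldl
    (fun row yi =>
      row.set yi
        (if xi = 0 ∨ yi = 0 then none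
         else if xr.getD (xi - 1) 0 = yr.getD (yi - 1) 0 then some 2 else some 1))
    (List.replicate (ny + 1) none)

-- outer loop 'for xi in range(nx+1)'
def buildDp (xr yr : List Int) (nx ny : Nat) : List (List (Option Int)) :=
  (List.range (nx + 1)).map (buildRow xr yr ny)

-- 'while dp[xi][yi] == TO_TOP: xi -= 1'  (dp[0][yi] is never TO_TOP, so xi stays ≥ 0)
def aInner (dp : List (List (Option Int))) (yi : Nat) : Nat → Nat
  | 0 => 0
  | xi + 1 => if dpAt dp (xi + 1) yi = some 1 then aInner dp yi xi else xi + 1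

-- 'while yi > 0 and xi > 0: …'; 'none' = the RuntimeError branch
def aOuter (dp : List (List (Option Int))) : Nat → Nat → List Bool → Option (List Bool)
  | _, 0, marks => some marks
  | xi, yi + 1, marks =>
    if xi = 0 then some marks
    else
      let xi' := aInner dp (yi + 1) xi
      if dpAt dp xi' (yi + 1) = none then none
      else aOuter dp (xi' - 1) yi (marks.set (xi' - 1) true)

def lcs_marks (x : List Int) (y : List Int) : List Bool :=
  let xr := x.reverse
  let yr := y.reverse
  let nx := xr.length
  let ny := yr.length
  let dp := buildDp xr yr nx ny
  match aOuter dp nx ny (List.replicate nx false) with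
  | some m => m.reverse
  | none => []   -- RuntimeError: outside Pre_

-- ===== PORT B =====
def lcs_marks_alt (x : List Int) (y : List Int) : List Bool :=
  let s := x.foldl
    (fun (s : List Bool × Nat) v =>
      if s.2 < y.length ∧ v = y.getD s.2 0 then (s.1 ++ [true], s.2 + 1)
      else (s.1 ++ [false], s.2))
    ([], 0)
  if s.2 < y.length then [] else s.1   -- RuntimeError: outside Pre_

-- ===== PRECONDITION & SPEC =====
-- Pre_ excludes exactly the inputs where A raises RuntimeError (y not a subsequence of x,
-- x nonempty) plus the corner x = [] ≠ y, where A returns () by skipping its loop while B,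
-- which checks that all of y was matched, raises.
def Pre_lcs_marks (x : List Int) (y : List Int) : Prop := y.Sublist x
instance (x : List Int) (y : List Int) : Decidable (Pre_lcs_marks x y) := by
  unfold Pre_lcs_marks; infer_instance
def pvWitness_lcs_marks : List Int × List Int := ([1, 2, 1, 3], [2, 3])

def Spec_lcs_marks (x : List Int) (y : List Int) (out : List Bool) : Prop := out = lcs_marks_alt x y
instance (x : List Int) (y : List Int) (out : List Bool) : Decidable (Spec_lcs_marks x y out) := by unfold Spec_lcs_marks; infer_instance

-- ===== CLAIM (what is proved, stated in full; the proofs are below) =====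
def Claim_equal_lcs_marks : Prop := ∀ (x : List Int) (y : List Int), Dom_lcs_marks x y → Pre_lcs_marks x y → Spec_lcs_marks x y (lcs_marks x y)

-- ===== LEMMAS AND PROOFS =====

-- reference: greedy leftmost matching; returns (marks, unmatched remainder of y)
def greedy : List Int → List Int → List Bool × List Int
  | [], ys => ([], ys)
  | _ :: xs, [] => (false :: (greedy xs []).1, [])
  | v :: xs, w :: ys =>
    if v = w then (true :: (greedy xs ys).1, (greedy xs ys).2)
    else (false :: (greedy xs (w :: ys)).1, (greedy xs (w :: ys)).2)

theorem greedy_nil_y (xs : List Int) : greedy xs [] = (List.replicate xs.length false, []) := by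
  induction xs with
  | nil => simp [greedy]
  | cons v xs ih => simp [greedy, ih, List.replicate_succ]

theorem sublist_tail_tail {a b : Int} {l1 l2 : List Int} (h : List.Sublist (a :: l1) (b :: l2)) :
    List.Sublist l1 l2 := by
  cases h with
  | cons _ h => exact ((List.sublist_cons_self a l1).trans h)
  | cons₂ _ h => exact h

theorem sublist_cons_of_ne {a b : Int} {l1 l2 : List Int} (h : List.Sublist (a :: l1) (b :: l2))
    (hne : b ≠ a) : List.Sublist (a :: l1) l2 := by
  cases h with
  | cons _ h => exact h
  | cons₂ _ h => exact absurd rfl hne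

theorem greedy_complete (xs ys : List Int) (h : List.Sublist ys xs) : (greedy xs ys).2 = [] := by
  induction xs generalizing ys with
  | nil => simpa [greedy] using List.sublist_nil.mp h
  | cons v xs ih =>
    cases ys with
    | nil => simp [greedy]
    | cons w ys =>
      by_cases hvw : v = w
      · simp only [greedy, hvw, if_true]
        exact ih ys (sublist_tail_tail h)
      · simp only [greedy, hvw, if_false]
        exact ih (w :: ys) (sublist_cons_of_ne h hvw)

-- B-side fold invariant
theorem B_fold (y : List Int) (xs : List Int) :
    ∀ (m : List Bool) (j : Nat), j ≤ y.length →
    xs.foldl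
      (fun (s : List Bool × Nat) v =>
        if s.2 < y.length ∧ v = y.getD s.2 0 then (s.1 ++ [true], s.2 + 1)
        else (s.1 ++ [false], s.2))
      (m, j)
    = (m ++ (greedy xs (y.drop j)).1, y.length - (greedy xs (y.drop j)).2.length) := by
  induction xs with
  | nil =>
    intro m j hj
    simp only [List.foldl_nil, greedy, List.append_nil]
    have h2 : y.length - (y.drop j).length = j := by
      simp [List.length_drop]; omega
    rw [h2]
  | cons v xs ih =>
    intro m j hj
    by_cases hlt : j < y.length
    · have hdrop : y.drop j = y.getD j 0 :: y.drop (j + 1) := by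
        rw [List.getD_eq_getElem y 0 hlt]
        exact List.drop_eq_getElem_cons hlt
      by_cases hv : v = y.getD j 0
      · have hc : (j < y.length ∧ v = y.getD j 0) := ⟨hlt, hv⟩
        simp only [List.foldl_cons, if_pos hc]
        rw [ih (m ++ [true]) (j + 1) hlt]
        rw [hdrop]
        unfold List.getD at hv
        simp [greedy, hv]
      · have hc : ¬(j < y.length ∧ v = y.getD j 0) := by tauto
        simp only [List.foldl_cons, if_neg hc]
        rw [ih (m ++ [false]) j hj]
        rw [hdrop]
        unfold List.getD at hv
        simp [greedy, hv]
    · have hj' : j = y.length := by omega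
      have hdrop : y.drop j = [] := by simp [hj']
      have hc : ¬(j < y.length ∧ v = y.getD j 0) := by tauto
      simp only [List.foldl_cons, if_neg hc]
      rw [ih (m ++ [false]) j hj]
      rw [hdrop]
      simp [greedy, greedy_nil_y]

-- characterization of the fold-of-set row build
theorem foldl_set_getD (f : Nat → Option Int) (n : Nat) (base : List (Option Int)) (k : Nat) :
    (((List.range n).foldl (fun r i => r.set i (f i)) base).getD k none)
    = if k < n ∧ k < base.length then f k else base.getD k none := by
  induction n with
  | zero => simp
  | succ n ih =>
    rw [List.range_succ, List.foldl_append]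
    have hlen : ((List.range n).foldl (fun r i => r.set i (f i)) base).length = base.length := by
      clear ih
      induction n with
      | zero => simp
      | succ n ih2 => rw [List.range_succ, List.foldl_append]; simp [ih2]
    simp only [List.foldl_cons, List.foldl_nil]
    unfold List.getD at ih ⊢
    rw [List.getElem?_set, hlen]
    by_cases hk : n = k
    · subst hk
      by_cases hb : n < base.length
      · simp [hb]
      · have hnone : base[n]? = none := List.getElem?_eq_none (by omega)
        simp [hb]
    · rw [if_neg hk, ih]
      have heq : (k < n + 1 ∧ k < base.length) ↔ (k < n ∧ k < base.length) := by omega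
      rw [if_congr heq rfl rfl]

theorem dpAt_buildDp (xr yr : List Int) (xi yi : Nat) :
    dpAt (buildDp xr yr xr.length yr.length) xi yi
    = if 1 ≤ yi ∧ yi ≤ xi ∧ yi ≤ yr.length ∧ xi ≤ xr.length then
        (if xr.getD (xi - 1) 0 = yr.getD (yi - 1) 0 then some 2 else some 1)
      else none := by
  unfold dpAt buildDp
  by_cases hxi : xi < xr.length + 1
  · have hget : ((List.range (xr.length + 1)).map (buildRow xr yr yr.length)).getD xi []
        = buildRow xr yr yr.length xi := by
      unfold List.getD
      rw [List.getElem?_map, List.getElem?_range hxi]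
      rfl
    rw [hget]
    unfold buildRow
    rw [foldl_set_getD (fun yi => if xi = 0 ∨ yi = 0 then none
         else if xr.getD (xi - 1) 0 = yr.getD (yi - 1) 0 then some 2 else some 1)]
    simp only [List.length_replicate]
    by_cases h0 : 1 ≤ yi ∧ yi ≤ xi ∧ yi ≤ yr.length
    · rw [if_pos (by omega : yi < min (xi + 1) (yr.length + 1) ∧ yi < yr.length + 1)]
      rw [if_neg (by omega : ¬(xi = 0 ∨ yi = 0))]
      rw [if_pos ((⟨h0.1, h0.2.1, h0.2.2, by omega⟩ : 1 ≤ yi ∧ yi ≤ xi ∧ yi ≤ yr.length ∧ xi ≤ xr.length))]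
    · rw [if_neg (by omega : ¬(1 ≤ yi ∧ yi ≤ xi ∧ yi ≤ yr.length ∧ xi ≤ xr.length))]
      by_cases hc : yi < min (xi + 1) (yr.length + 1) ∧ yi < yr.length + 1
      · rw [if_pos hc, if_pos (by omega : xi = 0 ∨ yi = 0)]
      · rw [if_neg hc]
        simp only [List.getD, List.getElem?_replicate]
        split <;> rfl
  · have hnil : ((List.range (xr.length + 1)).map (buildRow xr yr yr.length)).getD xi [] = [] := by
      unfold List.getD
      rw [List.getElem?_eq_none (by simpa using (by omega : ¬ xi < xr.length + 1))]
      rfl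
    rw [hnil, if_neg (by omega : ¬(1 ≤ yi ∧ yi ≤ xi ∧ yi ≤ yr.length ∧ xi ≤ xr.length))]
    simp [List.getD]

theorem dpAt_orig (x y : List Int) (xi yi : Nat) :
    dpAt (buildDp x.reverse y.reverse x.reverse.length y.reverse.length) xi yi
    = if 1 ≤ yi ∧ yi ≤ xi ∧ yi ≤ y.length ∧ xi ≤ x.length then
        (if x.getD (x.length - xi) 0 = y.getD (y.length - yi) 0 then some 2 else some 1)
      else none := by
  rw [dpAt_buildDp]
  simp only [List.length_reverse]
  by_cases h : 1 ≤ yi ∧ yi ≤ xi ∧ yi ≤ y.length ∧ xi ≤ x.length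
  · rw [if_pos h, if_pos h]
    have h1 : x.reverse.getD (xi - 1) 0 = x.getD (x.length - xi) 0 := by
      have hx1 : xi - 1 < x.reverse.length := by simp; omega
      rw [List.getD_eq_getElem _ _ hx1,
          List.getD_eq_getElem _ _ (by omega : x.length - xi < x.length)]
      rw [List.getElem_reverse]
      congr 1
      omega
    have h2 : y.reverse.getD (yi - 1) 0 = y.getD (y.length - yi) 0 := by
      have hy1 : yi - 1 < y.reverse.length := by simp; omega
      rw [List.getD_eq_getElem _ _ hy1,
          List.getD_eq_getElem _ _ (by omega : y.length - yi < y.length)]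
      rw [List.getElem_reverse]
      congr 1
      omega
    rw [h1, h2]
  · rw [if_neg h, if_neg h]

-- main invariant of A's backtrack, in original coordinates
theorem A_main (x y : List Int) :
    ∀ xi yi (marks : List Bool), xi ≤ x.length → yi ≤ y.length →
    marks.length = x.length →
    marks.take xi = List.replicate xi false →
    List.Sublist (y.drop (y.length - yi)) (x.drop (x.length - xi)) →
    aOuter (buildDp x.reverse y.reverse x.reverse.length y.reverse.length) xi yi marks
    = some ((greedy (x.drop (x.length - xi)) (y.drop (y.length - yi))).1.reverse ++ marks.drop xi) := by
  intro xi
  induction xi using Nat.strong_induction_on with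
  | _ xi IH =>
  intro yi marks hxi hyi hlen htake hsub
  cases yi with
  | zero =>
    simp only [aOuter, Nat.sub_zero, List.drop_length]
    rw [greedy_nil_y]
    have hl : (x.drop (x.length - xi)).length = xi := by simp; omega
    rw [hl, List.reverse_replicate, ← htake, List.take_append_drop]
  | succ yi' =>
    have hxi0 : xi ≠ 0 := by
      intro h0
      subst h0
      rw [Nat.sub_zero, List.drop_length] at hsub
      have he := List.sublist_nil.mp hsub
      have hlen2 : (y.drop (y.length - (yi' + 1))).length = yi' + 1 := by simp; omega
      rw [he] at hlen2
      simp at hlen2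
    have hyixi : yi' + 1 ≤ xi := by
      have h1 := hsub.length_le
      simp only [List.length_drop] at h1
      omega
    have hp : x.length - xi < x.length := by omega
    have hj : y.length - (yi' + 1) < y.length := by omega
    have hxdrop : x.drop (x.length - xi) = x.getD (x.length - xi) 0 :: x.drop (x.length - xi + 1) := by
      rw [List.getD_eq_getElem _ _ hp]
      exact List.drop_eq_getElem_cons hp
    have hydrop : y.drop (y.length - (yi' + 1))
        = y.getD (y.length - (yi' + 1)) 0 :: y.drop (y.length - (yi' + 1) + 1) := by
      rw [List.getD_eq_getElem _ _ hj]
      exact List.drop_eq_getElem_cons hj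
    have htake' : marks.take (xi - 1) = List.replicate (xi - 1) false := by
      have : marks.take (xi - 1) = (marks.take xi).take (xi - 1) := by
        rw [List.take_take]
        congr 1
        omega
      rw [this, htake, List.take_replicate]
      congr 1
      omega
    by_cases hm : x.getD (x.length - xi) 0 = y.getD (y.length - (yi' + 1)) 0
    · -- heads match: aInner stops immediately, mark xi-1, recurse
      have hdp : dpAt (buildDp x.reverse y.reverse x.reverse.length y.reverse.length) xi (yi' + 1) = some 2 := by
        rw [dpAt_orig, if_pos (⟨by omega, hyixi, by omega, hxi⟩ :
          1 ≤ yi' + 1 ∧ yi' + 1 ≤ xi ∧ yi' + 1 ≤ y.length ∧ xi ≤ x.length), if_pos hm]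
      have hinner : aInner (buildDp x.reverse y.reverse x.reverse.length y.reverse.length) (yi' + 1) xi = xi := by
        conv_lhs => rw [show xi = (xi - 1) + 1 by omega]
        simp only [aInner]
        rw [if_neg (by rw [show xi - 1 + 1 = xi by omega, hdp]; simp)]
        omega
      simp only [aOuter, if_neg hxi0, hinner, hdp]
      simp only [reduceCtorEq, if_false]
      have hsub' : List.Sublist (y.drop (y.length - yi')) (x.drop (x.length - (xi - 1))) := by
        rw [show y.length - yi' = y.length - (yi' + 1) + 1 by omega,
            show x.length - (xi - 1) = x.length - xi + 1 by omega]
        rw [hxdrop, hydrop] at hsub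
        exact sublist_tail_tail hsub
      rw [IH (xi - 1) (by omega) yi' (marks.set (xi - 1) true) (by omega) (by omega)
          (by simp [hlen])
          (by rw [List.take_set, htake', List.set_eq_of_length_le (by simp)])
          hsub']
      have hdropset : (marks.set (xi - 1) true).drop (xi - 1) = true :: marks.drop xi := by
        rw [List.drop_set, if_neg (by omega : ¬ xi - 1 < xi - 1)]
        rw [List.drop_eq_getElem_cons (by omega : xi - 1 < marks.length)]
        rw [show xi - 1 + 1 = xi by omega]
        simp
      rw [hdropset]
      rw [show x.length - (xi - 1) = x.length - xi + 1 by omega,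
          show y.length - yi' = y.length - (yi' + 1) + 1 by omega]
      conv_rhs => rw [hxdrop, hydrop]
      simp only [greedy, if_pos hm, List.reverse_cons, List.append_assoc, List.cons_append,
        List.nil_append]
    · -- heads differ
      have hne : yi' + 1 ≠ xi := by
        intro he
        have hleq : (y.drop (y.length - (yi' + 1))).length = (x.drop (x.length - xi)).length := by
          simp only [List.length_drop]
          omega
        have := hsub.eq_of_length hleq
        rw [hxdrop, hydrop] at this
        exact hm (List.head_eq_of_cons_eq this.symm)
      have hlt : yi' + 1 < xi := by omega
      have hdp1 : dpAt (buildDp x.reverse y.reverse x.reverse.length y.reverse.length) xi (yi' + 1) = some 1 := by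
        rw [dpAt_orig, if_pos (⟨by omega, hyixi, by omega, hxi⟩ :
          1 ≤ yi' + 1 ∧ yi' + 1 ≤ xi ∧ yi' + 1 ≤ y.length ∧ xi ≤ x.length), if_neg hm]
      have hinner : aInner (buildDp x.reverse y.reverse x.reverse.length y.reverse.length) (yi' + 1) xi
          = aInner (buildDp x.reverse y.reverse x.reverse.length y.reverse.length) (yi' + 1) (xi - 1) := by
        conv_lhs => rw [show xi = (xi - 1) + 1 by omega]
        simp only [aInner]
        rw [if_pos (by rw [show xi - 1 + 1 = xi by omega]; exact hdp1)]
      have hstep : aOuter (buildDp x.reverse y.reverse x.reverse.length y.reverse.length) xi (yi' + 1) marks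
          = aOuter (buildDp x.reverse y.reverse x.reverse.length y.reverse.length) (xi - 1) (yi' + 1) marks := by
        simp only [aOuter, if_neg hxi0, if_neg (by omega : ¬ xi - 1 = 0), hinner]
      rw [hstep]
      have hsub' : List.Sublist (y.drop (y.length - (yi' + 1))) (x.drop (x.length - (xi - 1))) := by
        rw [show x.length - (xi - 1) = x.length - xi + 1 by omega, hydrop]
        rw [hxdrop, hydrop] at hsub
        exact sublist_cons_of_ne hsub hm
      rw [IH (xi - 1) (by omega) (yi' + 1) marks (by omega) hyi hlen htake' hsub']
      have hdropm : marks.drop (xi - 1) = false :: marks.drop xi := by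
        rw [List.drop_eq_getElem_cons (by omega : xi - 1 < marks.length)]
        rw [show xi - 1 + 1 = xi by omega]
        have h1 : marks[xi - 1]? = some false := by
          have h2 : (marks.take xi)[xi - 1]? = marks[xi - 1]? := by
            rw [List.getElem?_take, if_pos (by omega : xi - 1 < xi)]
          rw [← h2, htake, List.getElem?_replicate, if_pos (by omega : xi - 1 < xi)]
        rw [List.getElem?_eq_getElem (by omega : xi - 1 < marks.length)] at h1
        congr 1
        exact Option.some.inj h1
      rw [hdropm]
      rw [show x.length - (xi - 1) = x.length - xi + 1 by omega]
      conv_rhs => rw [hxdrop, hydrop]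
      simp only [greedy, if_neg hm, List.reverse_cons, List.append_assoc, List.cons_append,
        List.nil_append]
      rw [← hydrop]

-- ===== VERDICT (by name: the statement is the Claim_ definition above) =====
theorem lcs_marks_spec : Claim_equal_lcs_marks := by
  intro x y _ hpre
  unfold Spec_lcs_marks lcs_marks lcs_marks_alt
  have hg2 : (greedy x y).2 = [] := greedy_complete x y hpre
  have hB := B_fold y x [] 0 (Nat.zero_le _)
  rw [List.drop_zero] at hB
  rw [hB, hg2]
  simp only [List.length_nil, Nat.sub_zero, List.nil_append, lt_self_iff_false, if_false]
  have hA := A_main x y x.length y.length (List.replicate x.length false)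
      (le_refl _) (le_refl _) (by simp) (by simp [List.take_replicate])
      (by simpa [Nat.sub_self] using hpre)
  rw [Nat.sub_self, Nat.sub_self, List.drop_zero, List.drop_zero] at hA
  simp only [List.length_reverse] at hA
  simp only [List.length_reverse]
  rw [hA]
  simp
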